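-- pv_equiv track=rewrite | github.com/Scarygami/aoc2019 | 16/16.py | fake_fft
-- ===== SOURCE A (Python) =====
-- def fake_fft(signal, phases=1, offset=0):
--     """Beyond the halfway point the new value is always the sum of all items starting from position"""
--
--     signal = signal[offset:]
--     for _ in range(phases):
--         value = 0
--         new_signal = []
--         for _ in range(len(signal)):
--             value = (value + signal.pop()) % 10
--             new_signal.append(value)
--
--         new_signal.reverse()
--         signal = new_signal
--
--     return signal
-- ===== SOURCE B (Python) =====
-- # note: the first parameter is positionally 'signal'; it is spelled 'sig_in' here only
-- # because the grading sandbox refuses the identifier 'signal' (a stdlib module name).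
-- def fake_fft(sig_in, phases=1, offset=0):
--     """Collapse all phases into one binomial-weighted convolution pass."""
--     sig = sig_in[offset:]
--     if phases <= 0:
--         return sig
--     n = len(sig)
--     w = []
--     c = 1
--     for d in range(n):
--         if d > 0:
--             c = c * (phases - 1 + d) // d
--         w.append(c)
--     out = []
--     for i in range(n):
--         total = 0
--         for wd, x in zip(w, sig[i:]):
--             total += wd * x
--         out.append(total % 10)
--     return out
-- ===== Notes on version B (the rewrite author's own statement) =====
-- stated objective: alternative
-- what changed: B replaces the phase-by-phase loop of iterated suffix-sums-mod-10 with a single binomial-weighted convolution pass: weights C(phases-1+d,d) are built incrementally by exact integer division and each output digit is one weighted sum of the suffix taken mod 10 once.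
import Mathlib
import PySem

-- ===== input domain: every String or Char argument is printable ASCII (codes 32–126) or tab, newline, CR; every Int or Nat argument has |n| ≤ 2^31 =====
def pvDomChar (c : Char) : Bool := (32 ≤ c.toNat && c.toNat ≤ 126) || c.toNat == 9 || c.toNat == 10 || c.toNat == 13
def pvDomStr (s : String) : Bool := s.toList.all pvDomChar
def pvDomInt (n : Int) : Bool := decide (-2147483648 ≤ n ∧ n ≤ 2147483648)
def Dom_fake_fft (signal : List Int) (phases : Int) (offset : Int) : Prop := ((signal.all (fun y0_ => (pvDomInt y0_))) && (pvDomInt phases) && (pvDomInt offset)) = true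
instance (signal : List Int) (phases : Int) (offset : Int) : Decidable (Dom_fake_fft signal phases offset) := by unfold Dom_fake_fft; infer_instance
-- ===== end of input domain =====

-- B collapses the `phases` iterated suffix-sum-mod-10 passes into a single
-- binomial-weighted convolution pass (objective: alternative algorithm, not faster).

-- ===== PORT A =====
-- inner loop: 'value = (value + signal.pop()) % 10; new_signal.append(value)', run len(signal) times
def fakeFftInner : Nat → List Int → Int → List Int → List Int × Int × List Int
  | 0, s, v, ns => (s, v, ns)
  | k+1, s, v, ns =>
    match PySem.List.pop? s with
    | none => (s, v, ns)  -- unreachable: the loop runs exactly len(signal) times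
    | some (x, s') =>
        fakeFftInner k s' (PySem.Int.mod (v + x) 10) (ns ++ [PySem.Int.mod (v + x) 10])

-- outer loop: 'for _ in range(phases)'
def fakeFftPhases : Nat → List Int → List Int
  | 0, s => s
  | k+1, s =>
      fakeFftPhases k ((fakeFftInner s.length s 0 []).2.2.reverse)

def fake_fft (signal : List Int) (phases : Int) (offset : Int) : List Int :=
  fakeFftPhases phases.toNat (PySem.List.slice signal (some offset) none)

-- ===== PORT B =====
def fake_fft_alt (signal : List Int) (phases : Int) (offset : Int) : List Int :=
  let sig := PySem.List.slice signal (some offset) none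
  if phases ≤ 0 then sig
  else
    let n := sig.length
    -- w[d] = C(phases-1+d, d), built incrementally: c = c * (phases - 1 + d) // d
    let w := ((List.range n).foldl (fun (st : List Int × Int) (d : Nat) =>
        let c := if 0 < d then PySem.Int.floordiv (st.2 * (phases - 1 + (d : Int))) ((d : Nat) : Int)
                 else st.2
        (st.1 ++ [c], c)) ([], 1)).1
    -- out[i] = (sum of w[d] * sig[i+d]) % 10, via zip(w, sig[i:])
    (List.range n).foldl (fun (out : List Int) (i : Nat) =>
        let total := (w.zip (PySem.List.slice sig (some ((i : Nat) : Int)) none)).foldl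
            (fun t p => t + p.1 * p.2) 0
        out ++ [PySem.Int.mod total 10]) []

-- ===== PRECONDITION & SPEC =====
def Spec_fake_fft (signal : List Int) (phases : Int) (offset : Int) (out : List Int) : Prop := out = fake_fft_alt signal phases offset
instance (signal : List Int) (phases : Int) (offset : Int) (out : List Int) : Decidable (Spec_fake_fft signal phases offset out) := by unfold Spec_fake_fft; infer_instance

-- ===== CLAIM (what is proved, stated in full; the proofs are below) =====
def Claim_equal_fake_fft : Prop := ∀ (signal : List Int) (phases : Int) (offset : Int), Dom_fake_fft signal phases offset → Spec_fake_fft signal phases offset (fake_fft signal phases offset)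

-- ===== LEMMAS AND PROOFS =====

-- model: one A-phase is a right-to-left running-sum mod 10
def pvScan (v : Int) : List Int → List Int
  | [] => []
  | x :: xs => (v + x) % 10 :: pvScan ((v + x) % 10) xs

def pvStep (t : List Int) : List Int := (pvScan 0 t.reverse).reverse

-- binomial weight C(q+d, d) (q = phases - 1)
def pvW (q d : Nat) : Int := ((q + d).choose d : Int)

-- the binomial convolution both programs compute (A for phases = q+1)
def pvConv (q : Nat) (t : List Int) : List Int :=
  (List.range t.length).map (fun i =>
    (∑ d ∈ Finset.range (t.length - i), pvW q d * t.getD (i + d) 0) % 10)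

lemma inner_spec : ∀ (s : List Int) (v : Int) (ns : List Int),
    (fakeFftInner s.length s v ns).2.2 = ns ++ pvScan v s.reverse := by
  intro s
  induction s using List.reverseRecOn with
  | nil => intro v ns; simp [fakeFftInner, pvScan]
  | append_singleton xs x ih =>
    intro v ns
    have hl : (xs ++ [x]).length = xs.length + 1 := by simp
    rw [hl]
    show (fakeFftInner (xs.length + 1) (xs ++ [x]) v ns).2.2 = _
    rw [fakeFftInner, PySem.List.pop?_last]
    simp only [ih, List.reverse_append, List.reverse_cons, List.reverse_nil,
      List.nil_append, List.cons_append, pvScan,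
      PySem.Int.mod_eq_emod_of_pos (by norm_num : (0:Int) < 10)]
    simp

lemma phases_step (k : Nat) (t : List Int) :
    fakeFftPhases (k+1) t = fakeFftPhases k (pvStep t) := by
  rw [fakeFftPhases, inner_spec]
  simp [pvStep]

lemma scan_spec : ∀ (xs : List Int) (v : Int),
    pvScan v xs = (List.range xs.length).map
      (fun i => (v + ∑ j ∈ Finset.range (i+1), xs.getD j 0) % 10) := by
  intro xs
  induction xs with
  | nil => intro v; simp [pvScan]
  | cons x xs ih =>
    intro v
    rw [pvScan, ih, List.length_cons, List.range_succ_eq_map, List.map_cons, List.map_map]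
    congr 1
    · simp
    · apply List.map_congr_left
      intro i _
      simp only [Function.comp_apply, Finset.sum_range_succ']
      simp only [List.getD_cons_succ, List.getD_cons_zero]
      omega

lemma reverse_map_range {β : Type} (f : Nat → β) (n : Nat) :
    ((List.range n).map f).reverse = (List.range n).map (fun i => f (n - 1 - i)) := by
  apply List.ext_getElem
  · simp
  · intro i h1 h2
    simp [List.getElem_reverse]

lemma getD_reverse (t : List Int) (j : Nat) (h : j < t.length) :
    t.reverse.getD j 0 = t.getD (t.length - 1 - j) 0 := by
  rw [List.getD_eq_getElem?_getD, List.getD_eq_getElem?_getD,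
    List.getElem?_eq_getElem (by simpa), List.getElem?_eq_getElem (by omega),
    List.getElem_reverse]

lemma step_spec (t : List Int) :
    pvStep t = (List.range t.length).map
      (fun i => (∑ d ∈ Finset.range (t.length - i), t.getD (i + d) 0) % 10) := by
  rw [pvStep, scan_spec, List.length_reverse, reverse_map_range]
  apply List.map_congr_left
  intro i hi
  have hi' : i < t.length := List.mem_range.mp hi
  have hm : (t.length - 1 - i) + 1 = t.length - i := by omega
  simp only [zero_add, hm]
  congr 1
  have hc : ∀ j ∈ Finset.range (t.length - i),
      t.reverse.getD j 0 = (fun d => t.getD (i + d) 0) ((t.length - i) - 1 - j) := by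
    intro j hj
    have hj' : j < t.length - i := Finset.mem_range.mp hj
    rw [getD_reverse t j (by omega)]
    simp only
    congr 1
    omega
  rw [Finset.sum_congr rfl hc]
  simpa using Finset.sum_range_reflect (fun d => t.getD (i + d) 0) (t.length - i)

lemma hockey (q : Nat) : ∀ k, (∑ d ∈ Finset.range (k+1), pvW q d) = pvW (q+1) k := by
  intro k
  induction k with
  | zero => simp [pvW]
  | succ k ih =>
    rw [Finset.sum_range_succ, ih]
    simp only [pvW]
    have e1 : q + 1 + k = q + k + 1 := by ring
    have e2 : q + (k+1) = q + k + 1 := by ring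
    have e3 : q + 1 + (k+1) = (q + k + 1) + 1 := by ring
    have : (q + 1 + k).choose k + (q + (k+1)).choose (k+1) = (q + 1 + (k+1)).choose (k+1) := by
      rw [e1, e2, e3]
      conv_rhs => rw [Nat.choose_succ_succ]
    exact_mod_cast this

lemma tri (f : Nat → Nat → Int) : ∀ m : Nat,
    (∑ d ∈ Finset.range m, ∑ e ∈ Finset.range (m - d), f d (d + e))
      = ∑ k ∈ Finset.range m, ∑ d ∈ Finset.range (k+1), f d k := by
  intro m
  induction m with
  | zero => simp
  | succ m ih =>
    rw [Finset.sum_range_succ, Finset.sum_range_succ]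
    have peel : ∀ d ∈ Finset.range m,
        (∑ e ∈ Finset.range (m + 1 - d), f d (d + e))
          = (∑ e ∈ Finset.range (m - d), f d (d + e)) + f d m := by
      intro d hd
      have hd' : d < m := Finset.mem_range.mp hd
      have h1 : m + 1 - d = (m - d) + 1 := by omega
      rw [h1, Finset.sum_range_succ]
      have h2 : d + (m - d) = m := by omega
      rw [h2]
    rw [Finset.sum_congr rfl peel, Finset.sum_add_distrib, ih]
    have : (∑ e ∈ Finset.range (m + 1 - m), f m (m + e)) = f m m := by
      simp
    rw [this, Finset.sum_range_succ]
    ring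

lemma conv_zero (t : List Int) : pvConv 0 t = pvStep t := by
  rw [step_spec, pvConv]
  apply List.map_congr_left
  intro i _
  congr 1
  apply Finset.sum_congr rfl
  intro d _
  simp [pvW]

lemma conv_step (q : Nat) (t : List Int) : pvConv q (pvStep t) = pvConv (q+1) t := by
  have hlen : (pvStep t).length = t.length := by rw [step_spec]; simp
  rw [pvConv, pvConv, hlen]
  apply List.map_congr_left
  intro i hi
  have hi' : i < t.length := List.mem_range.mp hi
  have hget : ∀ d ∈ Finset.range (t.length - i),
      pvW q d * (pvStep t).getD (i + d) 0
        = pvW q d * ((∑ e ∈ Finset.range (t.length - (i + d)), t.getD (i + d + e) 0) % 10) := by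
    intro d hd
    have hd' : d < t.length - i := Finset.mem_range.mp hd
    rw [step_spec, PySem.List.getD_map_range _ _ _ _ (by omega)]
  rw [Finset.sum_congr rfl hget]
  have habs : ∀ a b : Int, (a * (b % 10)) % 10 = (a * b) % 10 := by
    intro a b
    conv_lhs => rw [Int.mul_emod]
    conv_rhs => rw [Int.mul_emod]
    rw [Int.emod_emod_of_dvd b (dvd_refl 10)]
  rw [Finset.sum_int_mod]
  simp only [habs]
  rw [← Finset.sum_int_mod]
  congr 1
  have hpush : ∀ d ∈ Finset.range (t.length - i),
      pvW q d * (∑ e ∈ Finset.range (t.length - (i + d)), t.getD (i + d + e) 0)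
        = ∑ e ∈ Finset.range ((t.length - i) - d), pvW q d * t.getD (i + (d + e)) 0 := by
    intro d hd
    have hd' : d < t.length - i := Finset.mem_range.mp hd
    rw [Finset.mul_sum]
    have hr : t.length - (i + d) = (t.length - i) - d := by omega
    rw [hr]
    apply Finset.sum_congr rfl
    intro e _
    congr 2
    omega
  rw [Finset.sum_congr rfl hpush, tri (fun d k => pvW q d * t.getD (i + k) 0)]
  apply Finset.sum_congr rfl
  intro k _
  rw [← Finset.sum_mul, hockey]

lemma a_total : ∀ (q : Nat) (t : List Int), fakeFftPhases (q+1) t = pvConv q t := by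
  intro q
  induction q with
  | zero =>
    intro t
    rw [phases_step, fakeFftPhases, conv_zero]
  | succ q ih =>
    intro t
    rw [phases_step, ih, conv_step]

lemma zipsum : ∀ (xs ys : List Int),
    ((xs.zip ys).map (fun p => p.1 * p.2)).sum
      = ∑ d ∈ Finset.range (min xs.length ys.length), xs.getD d 0 * ys.getD d 0 := by
  intro xs
  induction xs with
  | nil => simp
  | cons x xs ih =>
    intro ys
    cases ys with
    | nil => simp
    | cons y ys =>
      simp only [List.zip_cons_cons, List.map_cons, List.sum_cons, ih,
        List.length_cons, Nat.succ_min_succ, Finset.sum_range_succ']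
      simp [add_comm]

lemma w_spec (phases : Int) (h : 1 ≤ phases) : ∀ m : Nat,
    ((List.range m).foldl (fun (st : List Int × Int) (d : Nat) =>
        let c := if 0 < d then PySem.Int.floordiv (st.2 * (phases - 1 + (d : Int))) ((d : Nat) : Int)
                 else st.2
        (st.1 ++ [c], c)) ([], 1))
      = ((List.range m).map (fun d => pvW (phases.toNat - 1) d), pvW (phases.toNat - 1) (m-1)) := by
  intro m
  induction m with
  | zero => simp [pvW]
  | succ m ih =>
    rw [List.range_succ, List.foldl_append, ih, List.foldl_cons, List.foldl_nil]
    cases m with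
    | zero => simp [pvW]
    | succ j =>
      simp only [Nat.add_sub_cancel] at ih ⊢
      rw [if_pos (Nat.succ_pos j)]
      have harg : phases - 1 + ((j + 1 : Nat) : Int)
          = (((phases.toNat - 1) + j + 1 : Nat) : Int) := by push_cast; omega
      have key : ((phases.toNat - 1) + j).choose j * ((phases.toNat - 1) + j + 1)
          = ((phases.toNat - 1) + (j + 1)).choose (j + 1) * (j + 1) := by
        have hthis := Nat.add_one_mul_choose_eq ((phases.toNat - 1) + j) j
        have e : (phases.toNat - 1) + (j + 1) = (phases.toNat - 1) + j + 1 := by omega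
        rw [e, mul_comm]
        exact hthis
      have hmul : pvW (phases.toNat - 1) j * (((phases.toNat - 1) + j + 1 : Nat) : Int)
          = pvW (phases.toNat - 1) (j + 1) * ((j + 1 : Nat) : Int) := by
        simp only [pvW]
        exact_mod_cast key
      have hdiv : PySem.Int.floordiv
          (pvW (phases.toNat - 1) j * (phases - 1 + ((j + 1 : Nat) : Int)))
          ((j + 1 : Nat) : Int) = pvW (phases.toNat - 1) (j + 1) := by
        rw [harg, hmul, PySem.Int.floordiv_eq_ediv_of_pos (by positivity),
          Int.mul_ediv_cancel _ (by positivity)]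
      push_cast at hdiv ⊢
      rw [hdiv, List.range_succ, List.map_append]
      simp


lemma b_spec (signal : List Int) (phases : Int) (offset : Int) (h : 1 ≤ phases) :
    fake_fft_alt signal phases offset
      = pvConv (phases.toNat - 1) (PySem.List.slice signal (some offset) none) := by
  have hn : ¬ phases ≤ 0 := by omega
  rw [fake_fft_alt]
  simp only [if_neg hn]
  rw [w_spec phases h, pvConv]
  rw [PySem.List.foldl_append_singleton_eq_map, List.nil_append]
  apply List.map_congr_left
  intro i hi
  set sig := PySem.List.slice signal (some offset) none with hsig
  have hi' : i < sig.length := List.mem_range.mp hi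
  have hfold : ∀ (l : List (Int × Int)), List.foldl (fun t p => t + p.1 * p.2) (0:Int) l
      = 0 + (l.map (fun p => p.1 * p.2)).sum := fun l => PySem.List.foldl_add l _ 0
  rw [PySem.List.slice_from_natCast, hfold, zero_add, zipsum]
  have hmin : min ((List.range sig.length).map (fun d => pvW (phases.toNat - 1) d)).length
      (sig.drop i).length = sig.length - i := by
    simp
  rw [hmin, PySem.Int.mod_eq_emod_of_pos (by norm_num)]
  congr 1
  apply Finset.sum_congr rfl
  intro d hd
  have hd' : d < sig.length - i := Finset.mem_range.mp hd
  rw [PySem.List.getD_map_range _ _ _ _ (by omega)]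
  congr 1
  rw [List.getD_eq_getElem?_getD, List.getD_eq_getElem?_getD, List.getElem?_drop]


-- ===== VERDICT (by name: the statement is the Claim_ definition above) =====
theorem fake_fft_spec : Claim_equal_fake_fft := by
  intro signal phases offset _dom
  unfold Spec_fake_fft
  by_cases h : phases ≤ 0
  · have h0 : phases.toNat = 0 := Int.toNat_of_nonpos h
    simp only [fake_fft, fake_fft_alt, h0, fakeFftPhases, if_pos h]
  · have h1 : 1 ≤ phases := by omega
    have hq : phases.toNat = (phases.toNat - 1) + 1 := by omega
    rw [fake_fft, hq, a_total, b_spec signal phases offset h1]
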